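-- pv_equiv track=rewrite | github.com/jameswang14/tiling | app.py | _break_file
-- ===== SOURCE A (Python) =====
-- def _break_file(text):
--     res = []
--     for line in text.split("\n"):
--         running = []
--         chars = []
--         for c in line:
--             if c == ' ':
--                 continue
--             chars.append(c)
--
--             if c == "]":
--                 running.append([l for l in chars])
--                 chars = []
--         res.append([l for l in running])
--         running = []
--     return res
-- ===== SOURCE B (Python) =====
-- def _break_file(text):
--     return [[list(g + ']') for g in line.replace(' ', '').split(']')[:-1]]
--             for line in text.split('\n')]
-- ===== Notes on version B (the rewrite author's own statement) =====
-- stated objective: faster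
-- what changed: Replaced the two-accumulator char-by-char state machine with a per-line comprehension: strip spaces with replace, split on the closing bracket (dropping the trailing piece), and re-append the bracket to each chunk as a char list.
import Mathlib
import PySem

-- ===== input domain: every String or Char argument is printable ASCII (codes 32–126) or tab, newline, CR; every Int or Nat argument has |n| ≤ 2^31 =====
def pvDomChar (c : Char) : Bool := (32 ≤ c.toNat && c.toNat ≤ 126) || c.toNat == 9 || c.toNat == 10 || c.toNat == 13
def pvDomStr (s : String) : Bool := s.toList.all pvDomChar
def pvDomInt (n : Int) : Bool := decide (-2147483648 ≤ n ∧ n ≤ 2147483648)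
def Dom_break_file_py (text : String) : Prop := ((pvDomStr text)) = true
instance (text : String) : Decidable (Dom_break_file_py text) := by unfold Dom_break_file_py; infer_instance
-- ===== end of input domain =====

-- B replaces A's two-accumulator char-by-char state machine by a per-line space strip
-- followed by split-on-bracket tokenization (drop the trailing piece); measured faster (constant factor).

-- ===== PORT A =====
-- one step of A's inner loop: state = (running, chars)
def pvStepA (st : List (List String) × List String) (c : Char) :
    List (List String) × List String :=
  if c = ' ' then st
  else
    let chars := st.2 ++ [String.singleton c]
    if c = ']' then (st.1 ++ [chars], []) else (st.1, chars)

-- text.split("\n"): sep is nonempty, so split? is always some; .getD [] is never taken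
def break_file_py (text : String) : List (List (List String)) :=
  ((PySem.Str.split? text "\n").getD []).map
    (fun line => (line.toList.foldl pvStepA ([], [])).1)

-- ===== PORT B =====
-- per line: line.replace(' ', '') removes every space — ported as a filter (exact, since
-- the replacement is empty and the pattern a single char); cleaned.split(']') is
-- List.splitOn ']' (identical piece-by-piece for a 1-char separator); [:-1] is dropLast;
-- list(g + ']') is the map to singleton-char strings.
def break_file_py_alt (text : String) : List (List (List String)) :=
  ((PySem.Str.split? text "\n").getD []).map
    (fun line =>
      ((List.splitOn ']' (line.toList.filter (· ≠ ' '))).dropLast).map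
        (fun g => (g ++ [']']).map String.singleton))

-- ===== PRECONDITION & SPEC =====
def Spec_break_file_py (text : String) (out : List (List (List String))) : Prop := out = break_file_py_alt text
instance (text : String) (out : List (List (List String))) : Decidable (Spec_break_file_py text out) := by unfold Spec_break_file_py; infer_instance

-- ===== CLAIM (what is proved, stated in full; the proofs are below) =====
def Claim_equal_break_file_py : Prop := ∀ (text : String), Dom_break_file_py text → Spec_break_file_py text (break_file_py text)

-- ===== LEMMAS AND PROOFS =====

-- A's loop ignores spaces, so folding over a line equals folding over its non-space chars
theorem pv_foldl_filter (cs : List Char) (st : List (List String) × List String) :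
    cs.foldl pvStepA st = (cs.filter (· ≠ ' ')).foldl pvStepA st := by
  induction cs generalizing st with
  | nil => rfl
  | cons c rest ih =>
      by_cases hc : c = ' ' <;> simp [hc, pvStepA, ih]

-- continuation form of A's inner loop on a space-free line
def pvH (pend : List String) : List Char → List (List String)
  | [] => []
  | c :: rest =>
      if c = ']' then (pend ++ [String.singleton c]) :: pvH [] rest
      else pvH (pend ++ [String.singleton c]) rest

theorem pv_foldl_eq_H (cs : List Char) (h : ∀ c ∈ cs, c ≠ ' ')
    (acc : List (List String)) (pend : List String) :
    (cs.foldl pvStepA (acc, pend)).1 = acc ++ pvH pend cs := by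
  induction cs generalizing acc pend with
  | nil => simp [pvH]
  | cons c rest ih =>
      have hc : c ≠ ' ' := h c (by simp)
      have hrest : ∀ x ∈ rest, x ≠ ' ' := fun x hx => h x (by simp [hx])
      by_cases hb : c = ']' <;>
        simp [pvStepA, hc, hb, pvH, ih hrest]

theorem pv_modifyHead_nil_append (L : List (List String)) :
    L.modifyHead (fun g => ([] : List String) ++ g) = L := by
  cases L <;> simp

-- pvH with a pending prefix equals split-on-']'-and-drop-the-tail,
-- with the prefix spliced onto the first group
theorem pv_H_eq_split (cs : List Char) (pend : List String) :
    pvH pend cs =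
      (((List.splitOn ']' cs).dropLast).map
          (fun g => (g ++ [']']).map String.singleton)).modifyHead
        (fun g => pend ++ g) := by
  induction cs generalizing pend with
  | nil => simp [pvH, List.splitOn]
  | cons c rest ih =>
      simp only [List.splitOn] at ih ⊢
      rw [pvH, List.splitOnP_cons]
      by_cases hb : c = ']'
      · subst hb
        have hne : List.splitOnP (fun x => x == ']') rest ≠ [] := List.splitOnP_ne_nil _ _
        simp [ih, List.dropLast_cons_of_ne_nil, hne]
        rcases List.splitOnP (fun x => x == ']') rest with _ | ⟨a, t⟩ <;> simp
      · simp only [beq_iff_eq, hb, ite_false, ih]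
        rcases hsp : List.splitOnP (fun x => x == ']') rest with _ | ⟨a, _ | ⟨b, t⟩⟩
        · exact absurd hsp (List.splitOnP_ne_nil _ _)
        · simp
        · simp

theorem pv_line (cs : List Char) :
    (cs.foldl pvStepA ([], [])).1 =
      ((List.splitOn ']' (cs.filter (· ≠ ' '))).dropLast).map
        (fun g => (g ++ [']']).map String.singleton) := by
  rw [pv_foldl_filter]
  rw [pv_foldl_eq_H _ (fun c hc => by simpa using (List.mem_filter.mp hc).2)]
  rw [pv_H_eq_split, pv_modifyHead_nil_append]
  simp

-- ===== VERDICT (by name: the statement is the Claim_ definition above) =====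
theorem break_file_py_spec : Claim_equal_break_file_py := by
  intro text _
  unfold Spec_break_file_py break_file_py break_file_py_alt
  exact List.map_congr_left (fun line _ => pv_line line.toList)
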